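-- pv_equiv track=rewrite | github.com/KiranGershenfeld/ChordIdentification | BasicRecognition.py | getAllMatchingChords
-- ===== SOURCE A (Python) =====
-- def getRootNoteArray(root):
--     localAllNotes = ["c", "c#", "d", "d#", "e", "f", "f#", "g", "g#", "a", "a#", "b"]
--     for i in localAllNotes:
--         if(i == root):
--             for x in range(localAllNotes.index(i)):
--                 localAllNotes.append(localAllNotes[0])
--                 localAllNotes.remove(localAllNotes[0])
--             return localAllNotes #Rearranges all 12 notes to begin with the root note
--
-- def createIntervalDictionary(array):
--     allIntervals = ["0", "m2", "M2", "m3", "M3", "P4", "TT", "P5", "m6", "M6", "m7", "M7"]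
--     intervalDictionary = {}
--     for i in range(len(array)):
--         intervalDictionary[array[i]] = allIntervals[i]
--     return intervalDictionary #Creates a dictionary of every note and its corresponding interval to the root note
--
-- def notesToIntverals(noteArray, dict):
--     intervals = []
--     for note in noteArray:
--         for entry in dict:
--             if (note == entry):
--                 intervals.append(dict[entry])
--     return intervals #Creates a list that is the intervals of the raw notes in relation to the root note
--
-- def getIntervalDictionary():
--     twoNote = {}
--     #Not Using Two Note Intervals Anymore-- twoNote = {"Minor 2nd Interval" : ["0", "m2"], "Major 2nd Interval" : ["0", "M2"], "Minor 3rd Interval" : ["0", "m3"], "Major 3rd Interval" : ["0", "M3"], "Perfect 4th Interval" : ["0", "P4"], "TriTone Interval" : ["0", "TT"], "Perfect 5th Interval" : ["0", "P5"], "Minor 6th Interval" : ["0", "m6"], "Major 6th Interval" : ["0", "M6"], "Minor 7th Interval" : ["0", "m7"], "Major 7th Interval" : ["0", "M7"]}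
--     threeNote = {"Major" : ["0", "M3", "P5"], "Minor" : ["0", "m3", "P5"], "Augmented" : ["0", "M3", "m6"],"Diminished" : ["0", "m3", "TT"], "Sus 2" : ["0", "M2", "P5"], "Sus 4" : ["0", "P4", "P5"]}
--     fourNote = {"Major 7" : ["0", "M3", "P5", "M7"], "Minor 7" : ["0", "m3", "P5", "m7"], "Dominant 7" : ["0", "M3", "P5", "m7"], "Diminished 7" : ["0", "m3", "TT", "M6"], "Minor(Maj 7)" : ["0", "m3", "P5", "M7"], "Minor 7 b5" : ["0", "m3", "TT", "m7"], "6" : ["0", "M3", "P5", "M6"]}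
--     fiveNote = {"Major 9" : ["0", "M3", "P5", "M7", "M2"], "Minor 9" : ["0", "m3", "P5", "m7", "M2"], "9" : ["0", "M3", "P5", "m7", "M2"], "6/9" : ["0", "M3", "P5", "M6", "M2"], "11" : ["0", "M3", "P5", "m7", "P4"], "13" : ["0", "M3", "P5", "m7", "M6"]}
--     twoNote.update(threeNote)
--     twoNote.update(fourNote)
--     twoNote.update(fiveNote)
--     return twoNote
--
-- def intervalsToChords(data):
--     matchingChords = []
--     combinedDict = getIntervalDictionary()
--     for chordName in combinedDict: #loops over each chord possible
--         chordIntervals = combinedDict[chordName] #grabs the list of intervals for that chord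
--         if(checkIntervalMatch(data, chordIntervals)): #Checks to see if the intervals in that chord exist in the data
--             matchingChords.append(chordName)
--
--     return matchingChords
--
-- def checkIntervalMatch(data, chordIntervals):
--     for note in chordIntervals: #Loops over each interval in the chord that we are checking
--         if(note not in data): #If the chord has an interval that isnt in the data, return false
--             return False
--     return True #If every interval in the chord is met in the data, return true
--
-- def getAllMatchingChords(notes): #Cycle through evert root note to find all potential chords
--     allNotes = ["c", "c#", "d", "d#", "e", "f", "f#", "g", "g#", "a", "a#", "b"]
--     keyMatchingDict = {}
--     for rootNote in allNotes:
--         rootArray = getRootNoteArray(rootNote)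
--         intDict = createIntervalDictionary(rootArray)
--         intervals = notesToIntverals(notes, intDict)
--         matchingChords = intervalsToChords(intervals)
--         keyMatchingDict[rootNote] = matchingChords
--     return keyMatchingDict
-- ===== SOURCE B (Python) =====
-- def getAllMatchingChords(notes):
--     allNotes = ["c", "c#", "d", "d#", "e", "f", "f#", "g", "g#", "a", "a#", "b"]
--     # chord templates as semitone offsets from the root (no interval names needed)
--     CHORDS = [
--         ("Major", [0, 4, 7]), ("Minor", [0, 3, 7]), ("Augmented", [0, 4, 8]),
--         ("Diminished", [0, 3, 6]), ("Sus 2", [0, 2, 7]), ("Sus 4", [0, 5, 7]),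
--         ("Major 7", [0, 4, 7, 11]), ("Minor 7", [0, 3, 7, 10]),
--         ("Dominant 7", [0, 4, 7, 10]), ("Diminished 7", [0, 3, 6, 9]),
--         ("Minor(Maj 7)", [0, 3, 7, 11]), ("Minor 7 b5", [0, 3, 6, 10]),
--         ("6", [0, 4, 7, 9]),
--         ("Major 9", [0, 4, 7, 11, 2]), ("Minor 9", [0, 3, 7, 10, 2]),
--         ("9", [0, 4, 7, 10, 2]), ("6/9", [0, 4, 7, 9, 2]),
--         ("11", [0, 4, 7, 10, 5]), ("13", [0, 4, 7, 10, 9]),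
--     ]
--     present = [n in notes for n in allNotes]
--     out = {}
--     for r in range(12):
--         out[allNotes[r]] = [name for name, offs in CHORDS
--                             if all(present[(r + o) % 12] for o in offs)]
--     return out
-- ===== Notes on version B (the rewrite author's own statement) =====
-- stated objective: faster
-- what changed: B drops A's per-root list rotation, note-to-interval-name dictionaries and intermediate interval list: it precomputes one 12-entry membership table of the chromatic notes from the input once, stores chord templates as integer semitone offsets, and tests each (root, chord) pair directly via (root + offset) % 12 indexing.
import Mathlib
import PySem

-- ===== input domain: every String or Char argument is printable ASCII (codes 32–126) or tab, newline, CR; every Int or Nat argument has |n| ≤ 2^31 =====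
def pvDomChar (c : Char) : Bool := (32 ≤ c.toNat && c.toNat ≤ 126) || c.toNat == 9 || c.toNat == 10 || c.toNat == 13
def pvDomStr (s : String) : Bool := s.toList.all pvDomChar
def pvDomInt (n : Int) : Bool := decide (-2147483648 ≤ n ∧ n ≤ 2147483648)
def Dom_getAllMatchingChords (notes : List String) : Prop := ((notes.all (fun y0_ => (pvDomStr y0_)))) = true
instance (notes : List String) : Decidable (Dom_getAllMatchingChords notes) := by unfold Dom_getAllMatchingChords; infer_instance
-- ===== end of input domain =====

-- B replaces A's list-rotation and per-root interval-name dictionaries by one precomputed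
-- membership table and integer semitone offsets indexed modulo 12 (objective: faster — a single
-- membership pass over the input replaces A's per-root rescan; a timing run measured B faster).


-- ===== PORT A =====
def pyAllNotes : List String := ["c", "c#", "d", "d#", "e", "f", "f#", "g", "g#", "a", "a#", "b"]
def pyAllIntervals : List String := ["0", "m2", "M2", "m3", "M3", "P4", "TT", "P5", "m6", "M6", "m7", "M7"]

-- one body of A's inner rotation loop: append localAllNotes[0], then remove the first
-- occurrence of localAllNotes[0] (= the front element); exact for nonempty lists, and the
-- list here is always the nonempty 12-note list (on [] Python would raise IndexError)
def pyRot1 (l : List String) : List String :=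
  match l with
  | [] => []
  | x :: xs => xs ++ [x]

def pyRotSteps : Nat → List String → List String
  | 0, l => l
  | n + 1, l => pyRotSteps n (pyRot1 l)

-- 'for i in localAllNotes: if i == root: <rotate index(i) times>; return' — the first hit is
-- at index localAllNotes.index(root); None when root is not one of the 12 notes
def getRootNoteArray (root : String) : Option (List String) :=
  match PySem.List.index? pyAllNotes root with
  | some idx => some (pyRotSteps idx pyAllNotes)
  | none => none

-- indices i are in range of both lists at every call site (array is a 12-note rotation),
-- so the '.getD ""' defaults are never taken (Python would raise IndexError outside range)
def createIntervalDictionary (array : List String) : PySem.Dict String String :=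
  (List.range array.length).foldl
    (fun d i =>
      PySem.Dict.insert d ((PySem.List.pyGet? array (Int.ofNat i)).getD "")
        ((PySem.List.pyGet? pyAllIntervals (Int.ofNat i)).getD ""))
    PySem.Dict.empty

-- 'for entry in dict' iterates the keys; dict[entry] with entry a key of dict is getD (never defaults)
def notesToIntverals (noteArray : List String) (d : PySem.Dict String String) : List String :=
  noteArray.foldl
    (fun intervals note =>
      (PySem.Dict.keys d).foldl
        (fun ivs entry => if note == entry then ivs ++ [PySem.Dict.getD d entry ""] else ivs)
        intervals)
    []

def pyThreeNote : List (String × List String) :=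
  [("Major", ["0", "M3", "P5"]), ("Minor", ["0", "m3", "P5"]), ("Augmented", ["0", "M3", "m6"]),
   ("Diminished", ["0", "m3", "TT"]), ("Sus 2", ["0", "M2", "P5"]), ("Sus 4", ["0", "P4", "P5"])]
def pyFourNote : List (String × List String) :=
  [("Major 7", ["0", "M3", "P5", "M7"]), ("Minor 7", ["0", "m3", "P5", "m7"]),
   ("Dominant 7", ["0", "M3", "P5", "m7"]), ("Diminished 7", ["0", "m3", "TT", "M6"]),
   ("Minor(Maj 7)", ["0", "m3", "P5", "M7"]), ("Minor 7 b5", ["0", "m3", "TT", "m7"]),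
   ("6", ["0", "M3", "P5", "M6"])]
def pyFiveNote : List (String × List String) :=
  [("Major 9", ["0", "M3", "P5", "M7", "M2"]), ("Minor 9", ["0", "m3", "P5", "m7", "M2"]),
   ("9", ["0", "M3", "P5", "m7", "M2"]), ("6/9", ["0", "M3", "P5", "M6", "M2"]),
   ("11", ["0", "M3", "P5", "m7", "P4"]), ("13", ["0", "M3", "P5", "m7", "M6"])]

-- twoNote = {}; twoNote.update(threeNote); .update(fourNote); .update(fiveNote)
def getIntervalDictionary : PySem.Dict String (List String) :=
  ((pyThreeNote ++ pyFourNote ++ pyFiveNote).foldl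
    (fun d p => PySem.Dict.insert d p.1 p.2) PySem.Dict.empty)

-- 'for note in chordIntervals: if note not in data: return False / return True'
def checkIntervalMatch (data chordIntervals : List String) : Bool :=
  chordIntervals.all (fun note => data.contains note)

-- combinedDict[chordName] with chordName a key — getD never defaults
def intervalsToChords (data : List String) : List String :=
  (PySem.Dict.keys getIntervalDictionary).foldl
    (fun matching chordName =>
      if checkIntervalMatch data (PySem.Dict.getD getIntervalDictionary chordName []) then
        matching ++ [chordName]
      else matching)
    []

def getAllMatchingChords (notes : List String) : List (String × List String) :=
  (pyAllNotes.foldl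
    (fun kd rootNote =>
      -- rootNote is always one of the 12 notes, so getRootNoteArray never returns none
      -- (on None Python's createIntervalDictionary would raise TypeError)
      PySem.Dict.insert kd rootNote
        (intervalsToChords (notesToIntverals notes
          (match getRootNoteArray rootNote with
           | some a => createIntervalDictionary a
           | none => PySem.Dict.empty))))
    PySem.Dict.empty).items

-- ===== PORT B =====
def altAllNotes : List String := ["c", "c#", "d", "d#", "e", "f", "f#", "g", "g#", "a", "a#", "b"]

-- chord templates as semitone offsets from the root (no interval names)
def altChords : List (String × List Int) :=
  [("Major", [0, 4, 7]), ("Minor", [0, 3, 7]), ("Augmented", [0, 4, 8]),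
   ("Diminished", [0, 3, 6]), ("Sus 2", [0, 2, 7]), ("Sus 4", [0, 5, 7]),
   ("Major 7", [0, 4, 7, 11]), ("Minor 7", [0, 3, 7, 10]),
   ("Dominant 7", [0, 4, 7, 10]), ("Diminished 7", [0, 3, 6, 9]),
   ("Minor(Maj 7)", [0, 3, 7, 11]), ("Minor 7 b5", [0, 3, 6, 10]),
   ("6", [0, 4, 7, 9]),
   ("Major 9", [0, 4, 7, 11, 2]), ("Minor 9", [0, 3, 7, 10, 2]),
   ("9", [0, 4, 7, 10, 2]), ("6/9", [0, 4, 7, 9, 2]),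
   ("11", [0, 4, 7, 10, 5]), ("13", [0, 4, 7, 10, 9])]

-- indices allNotes[r] and present[(r+o)%12] are always in range (getD defaults never taken)
def getAllMatchingChords_alt (notes : List String) : List (String × List String) :=
  let present := altAllNotes.map (fun n => notes.contains n)
  ((PySem.List.pyRange 0 12 1).foldl
    (fun out r =>
      PySem.Dict.insert out ((PySem.List.pyGet? altAllNotes r).getD "")
        ((altChords.filter (fun c =>
            c.2.all (fun o =>
              (PySem.List.pyGet? present (PySem.Int.mod (r + o) 12)).getD false))).map
          (fun c => c.1)))
    PySem.Dict.empty).items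

-- ===== PRECONDITION & SPEC =====
def Spec_getAllMatchingChords (notes : List String) (out : List (String × List String)) : Prop := out = getAllMatchingChords_alt notes
instance (notes : List String) (out : List (String × List String)) : Decidable (Spec_getAllMatchingChords notes out) := by unfold Spec_getAllMatchingChords; infer_instance

-- ===== CLAIM =====
def Claim_equal_getAllMatchingChords : Prop := ∀ (notes : List String), Dom_getAllMatchingChords notes → Spec_getAllMatchingChords notes (getAllMatchingChords notes)

-- ===== LEMMAS AND PROOFS =====

-- a Boolean 'any' distributes over a pointwise disjunction
theorem pvAnyOr {α : Type} (l : List α) (p q : α → Bool) :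
    l.any (fun x => p x || q x) = (l.any p || l.any q) := by
  induction l with
  | nil => rfl
  | cons a t ih =>
      simp only [List.any_cons, ih]
      cases p a <;> cases q a <;> simp

-- A's interval collector, written as one flatMap: each input note contributes the values of
-- the dict entries whose key it equals
theorem nti_eq_flatMap (noteArray : List String) (d : PySem.Dict String String) :
    notesToIntverals noteArray d =
      noteArray.flatMap (fun note =>
        ((PySem.Dict.keys d).filter (fun entry => note == entry)).map
          (fun entry => PySem.Dict.getD d entry "")) := by
  unfold notesToIntverals
  simp only [PySem.List.foldl_append_if, PySem.List.foldl_append_eq_flatMap, List.nil_append]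

-- membership of a fixed interval t in A's collected intervals, re-indexed over the dict keys:
-- t occurs iff some key whose value is t occurs among the input notes
theorem contains_nti (notes : List String) (d : PySem.Dict String String) (t : String) :
    (notesToIntverals notes d).contains t =
      (PySem.Dict.keys d).any
        (fun e => (PySem.Dict.getD d e "" == t) && notes.contains e) := by
  rw [nti_eq_flatMap]
  induction notes with
  | nil => simp
  | cons n ns ih =>
      rw [List.flatMap_cons, List.contains_append, ih]
      have hcons : ∀ e : String, (n :: ns).contains e = ((e == n) || ns.contains e) := by
        intro e
        by_cases h : e = n
        · subst h; simp
        · simp [h]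
      simp only [hcons, Bool.and_or_distrib_left, pvAnyOr]
      congr 1
      rw [List.contains_eq_any_beq, List.any_map, List.any_filter]
      apply PySem.List.any_congr_mem
      intro e _
      rw [Bool.and_comm]
      exact congrArg₂ (· && ·) BEq.comm BEq.comm

-- when exactly one key of d carries value t, containment of t reduces to one input-membership test
theorem contains_nti_single (notes : List String) (d : PySem.Dict String String) (t x : String)
    (h : (PySem.Dict.keys d).filter (fun e => PySem.Dict.getD d e "" == t) = [x]) :
    (notesToIntverals notes d).contains t = notes.contains x := by
  rw [contains_nti, ← List.any_filter, h, List.any_cons, List.any_nil, Bool.or_false]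

-- one root row of A: the chord scan over the combined dict equals a filter of B's chord table
theorem row_eq (notes : List String) (d : PySem.Dict String String)
    (pB : String × List Int → Bool)
    (h : ∀ c ∈ altChords,
      checkIntervalMatch (notesToIntverals notes d)
        (PySem.Dict.getD getIntervalDictionary c.1 []) = pB c) :
    intervalsToChords (notesToIntverals notes d) = (altChords.filter pB).map (fun c => c.1) := by
  unfold intervalsToChords
  rw [PySem.List.foldl_append_if_eq_filter, List.nil_append]
  rw [show PySem.Dict.keys getIntervalDictionary = altChords.map (fun c => c.1) from by decide]
  rw [List.filter_map]
  exact congrArg _ (List.filter_congr (fun c hc => h c hc))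

-- B's membership-table lookups at each of the 12 fixed indices
theorem pvHp0 (notes : List String) : (PySem.List.pyGet? (altAllNotes.map (fun n => notes.contains n)) ((0:Int))).getD false = notes.contains "c" := by
  norm_num [PySem.List.pyGet?, PySem.List.pyIdx?, altAllNotes]
  try rfl
theorem pvHp1 (notes : List String) : (PySem.List.pyGet? (altAllNotes.map (fun n => notes.contains n)) ((1:Int))).getD false = notes.contains "c#" := by
  norm_num [PySem.List.pyGet?, PySem.List.pyIdx?, altAllNotes]
  try rfl
theorem pvHp2 (notes : List String) : (PySem.List.pyGet? (altAllNotes.map (fun n => notes.contains n)) ((2:Int))).getD false = notes.contains "d" := by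
  norm_num [PySem.List.pyGet?, PySem.List.pyIdx?, altAllNotes]
  try rfl
theorem pvHp3 (notes : List String) : (PySem.List.pyGet? (altAllNotes.map (fun n => notes.contains n)) ((3:Int))).getD false = notes.contains "d#" := by
  norm_num [PySem.List.pyGet?, PySem.List.pyIdx?, altAllNotes]
  try rfl
theorem pvHp4 (notes : List String) : (PySem.List.pyGet? (altAllNotes.map (fun n => notes.contains n)) ((4:Int))).getD false = notes.contains "e" := by
  norm_num [PySem.List.pyGet?, PySem.List.pyIdx?, altAllNotes]
  try rfl
theorem pvHp5 (notes : List String) : (PySem.List.pyGet? (altAllNotes.map (fun n => notes.contains n)) ((5:Int))).getD false = notes.contains "f" := by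
  norm_num [PySem.List.pyGet?, PySem.List.pyIdx?, altAllNotes]
  try rfl
theorem pvHp6 (notes : List String) : (PySem.List.pyGet? (altAllNotes.map (fun n => notes.contains n)) ((6:Int))).getD false = notes.contains "f#" := by
  norm_num [PySem.List.pyGet?, PySem.List.pyIdx?, altAllNotes]
  try rfl
theorem pvHp7 (notes : List String) : (PySem.List.pyGet? (altAllNotes.map (fun n => notes.contains n)) ((7:Int))).getD false = notes.contains "g" := by
  norm_num [PySem.List.pyGet?, PySem.List.pyIdx?, altAllNotes]
  try rfl
theorem pvHp8 (notes : List String) : (PySem.List.pyGet? (altAllNotes.map (fun n => notes.contains n)) ((8:Int))).getD false = notes.contains "g#" := by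
  norm_num [PySem.List.pyGet?, PySem.List.pyIdx?, altAllNotes]
  try rfl
theorem pvHp9 (notes : List String) : (PySem.List.pyGet? (altAllNotes.map (fun n => notes.contains n)) ((9:Int))).getD false = notes.contains "a" := by
  norm_num [PySem.List.pyGet?, PySem.List.pyIdx?, altAllNotes]
  try rfl
theorem pvHp10 (notes : List String) : (PySem.List.pyGet? (altAllNotes.map (fun n => notes.contains n)) ((10:Int))).getD false = notes.contains "a#" := by
  norm_num [PySem.List.pyGet?, PySem.List.pyIdx?, altAllNotes]
  try rfl
theorem pvHp11 (notes : List String) : (PySem.List.pyGet? (altAllNotes.map (fun n => notes.contains n)) ((11:Int))).getD false = notes.contains "b" := by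
  norm_num [PySem.List.pyGet?, PySem.List.pyIdx?, altAllNotes]
  try rfl
-- A's per-root dicts: containment of each interval name is one input-membership test
theorem pvC0_0 (notes : List String) : (notesToIntverals notes (match getRootNoteArray "c" with | some a => createIntervalDictionary a | none => PySem.Dict.empty)).contains "0" = notes.contains "c" := contains_nti_single notes _ _ _ (by decide)
theorem pvC0_2 (notes : List String) : (notesToIntverals notes (match getRootNoteArray "c" with | some a => createIntervalDictionary a | none => PySem.Dict.empty)).contains "M2" = notes.contains "d" := contains_nti_single notes _ _ _ (by decide)
theorem pvC0_3 (notes : List String) : (notesToIntverals notes (match getRootNoteArray "c" with | some a => createIntervalDictionary a | none => PySem.Dict.empty)).contains "m3" = notes.contains "d#" := contains_nti_single notes _ _ _ (by decide)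
theorem pvC0_4 (notes : List String) : (notesToIntverals notes (match getRootNoteArray "c" with | some a => createIntervalDictionary a | none => PySem.Dict.empty)).contains "M3" = notes.contains "e" := contains_nti_single notes _ _ _ (by decide)
theorem pvC0_5 (notes : List String) : (notesToIntverals notes (match getRootNoteArray "c" with | some a => createIntervalDictionary a | none => PySem.Dict.empty)).contains "P4" = notes.contains "f" := contains_nti_single notes _ _ _ (by decide)
theorem pvC0_6 (notes : List String) : (notesToIntverals notes (match getRootNoteArray "c" with | some a => createIntervalDictionary a | none => PySem.Dict.empty)).contains "TT" = notes.contains "f#" := contains_nti_single notes _ _ _ (by decide)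
theorem pvC0_7 (notes : List String) : (notesToIntverals notes (match getRootNoteArray "c" with | some a => createIntervalDictionary a | none => PySem.Dict.empty)).contains "P5" = notes.contains "g" := contains_nti_single notes _ _ _ (by decide)
theorem pvC0_8 (notes : List String) : (notesToIntverals notes (match getRootNoteArray "c" with | some a => createIntervalDictionary a | none => PySem.Dict.empty)).contains "m6" = notes.contains "g#" := contains_nti_single notes _ _ _ (by decide)
theorem pvC0_9 (notes : List String) : (notesToIntverals notes (match getRootNoteArray "c" with | some a => createIntervalDictionary a | none => PySem.Dict.empty)).contains "M6" = notes.contains "a" := contains_nti_single notes _ _ _ (by decide)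
theorem pvC0_10 (notes : List String) : (notesToIntverals notes (match getRootNoteArray "c" with | some a => createIntervalDictionary a | none => PySem.Dict.empty)).contains "m7" = notes.contains "a#" := contains_nti_single notes _ _ _ (by decide)
theorem pvC0_11 (notes : List String) : (notesToIntverals notes (match getRootNoteArray "c" with | some a => createIntervalDictionary a | none => PySem.Dict.empty)).contains "M7" = notes.contains "b" := contains_nti_single notes _ _ _ (by decide)
theorem pvC1_0 (notes : List String) : (notesToIntverals notes (match getRootNoteArray "c#" with | some a => createIntervalDictionary a | none => PySem.Dict.empty)).contains "0" = notes.contains "c#" := contains_nti_single notes _ _ _ (by decide)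
theorem pvC1_2 (notes : List String) : (notesToIntverals notes (match getRootNoteArray "c#" with | some a => createIntervalDictionary a | none => PySem.Dict.empty)).contains "M2" = notes.contains "d#" := contains_nti_single notes _ _ _ (by decide)
theorem pvC1_3 (notes : List String) : (notesToIntverals notes (match getRootNoteArray "c#" with | some a => createIntervalDictionary a | none => PySem.Dict.empty)).contains "m3" = notes.contains "e" := contains_nti_single notes _ _ _ (by decide)
theorem pvC1_4 (notes : List String) : (notesToIntverals notes (match getRootNoteArray "c#" with | some a => createIntervalDictionary a | none => PySem.Dict.empty)).contains "M3" = notes.contains "f" := contains_nti_single notes _ _ _ (by decide)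
theorem pvC1_5 (notes : List String) : (notesToIntverals notes (match getRootNoteArray "c#" with | some a => createIntervalDictionary a | none => PySem.Dict.empty)).contains "P4" = notes.contains "f#" := contains_nti_single notes _ _ _ (by decide)
theorem pvC1_6 (notes : List String) : (notesToIntverals notes (match getRootNoteArray "c#" with | some a => createIntervalDictionary a | none => PySem.Dict.empty)).contains "TT" = notes.contains "g" := contains_nti_single notes _ _ _ (by decide)
theorem pvC1_7 (notes : List String) : (notesToIntverals notes (match getRootNoteArray "c#" with | some a => createIntervalDictionary a | none => PySem.Dict.empty)).contains "P5" = notes.contains "g#" := contains_nti_single notes _ _ _ (by decide)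
theorem pvC1_8 (notes : List String) : (notesToIntverals notes (match getRootNoteArray "c#" with | some a => createIntervalDictionary a | none => PySem.Dict.empty)).contains "m6" = notes.contains "a" := contains_nti_single notes _ _ _ (by decide)
theorem pvC1_9 (notes : List String) : (notesToIntverals notes (match getRootNoteArray "c#" with | some a => createIntervalDictionary a | none => PySem.Dict.empty)).contains "M6" = notes.contains "a#" := contains_nti_single notes _ _ _ (by decide)
theorem pvC1_10 (notes : List String) : (notesToIntverals notes (match getRootNoteArray "c#" with | some a => createIntervalDictionary a | none => PySem.Dict.empty)).contains "m7" = notes.contains "b" := contains_nti_single notes _ _ _ (by decide)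
theorem pvC1_11 (notes : List String) : (notesToIntverals notes (match getRootNoteArray "c#" with | some a => createIntervalDictionary a | none => PySem.Dict.empty)).contains "M7" = notes.contains "c" := contains_nti_single notes _ _ _ (by decide)
theorem pvC2_0 (notes : List String) : (notesToIntverals notes (match getRootNoteArray "d" with | some a => createIntervalDictionary a | none => PySem.Dict.empty)).contains "0" = notes.contains "d" := contains_nti_single notes _ _ _ (by decide)
theorem pvC2_2 (notes : List String) : (notesToIntverals notes (match getRootNoteArray "d" with | some a => createIntervalDictionary a | none => PySem.Dict.empty)).contains "M2" = notes.contains "e" := contains_nti_single notes _ _ _ (by decide)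
theorem pvC2_3 (notes : List String) : (notesToIntverals notes (match getRootNoteArray "d" with | some a => createIntervalDictionary a | none => PySem.Dict.empty)).contains "m3" = notes.contains "f" := contains_nti_single notes _ _ _ (by decide)
theorem pvC2_4 (notes : List String) : (notesToIntverals notes (match getRootNoteArray "d" with | some a => createIntervalDictionary a | none => PySem.Dict.empty)).contains "M3" = notes.contains "f#" := contains_nti_single notes _ _ _ (by decide)
theorem pvC2_5 (notes : List String) : (notesToIntverals notes (match getRootNoteArray "d" with | some a => createIntervalDictionary a | none => PySem.Dict.empty)).contains "P4" = notes.contains "g" := contains_nti_single notes _ _ _ (by decide)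
theorem pvC2_6 (notes : List String) : (notesToIntverals notes (match getRootNoteArray "d" with | some a => createIntervalDictionary a | none => PySem.Dict.empty)).contains "TT" = notes.contains "g#" := contains_nti_single notes _ _ _ (by decide)
theorem pvC2_7 (notes : List String) : (notesToIntverals notes (match getRootNoteArray "d" with | some a => createIntervalDictionary a | none => PySem.Dict.empty)).contains "P5" = notes.contains "a" := contains_nti_single notes _ _ _ (by decide)
theorem pvC2_8 (notes : List String) : (notesToIntverals notes (match getRootNoteArray "d" with | some a => createIntervalDictionary a | none => PySem.Dict.empty)).contains "m6" = notes.contains "a#" := contains_nti_single notes _ _ _ (by decide)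
theorem pvC2_9 (notes : List String) : (notesToIntverals notes (match getRootNoteArray "d" with | some a => createIntervalDictionary a | none => PySem.Dict.empty)).contains "M6" = notes.contains "b" := contains_nti_single notes _ _ _ (by decide)
theorem pvC2_10 (notes : List String) : (notesToIntverals notes (match getRootNoteArray "d" with | some a => createIntervalDictionary a | none => PySem.Dict.empty)).contains "m7" = notes.contains "c" := contains_nti_single notes _ _ _ (by decide)
theorem pvC2_11 (notes : List String) : (notesToIntverals notes (match getRootNoteArray "d" with | some a => createIntervalDictionary a | none => PySem.Dict.empty)).contains "M7" = notes.contains "c#" := contains_nti_single notes _ _ _ (by decide)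
theorem pvC3_0 (notes : List String) : (notesToIntverals notes (match getRootNoteArray "d#" with | some a => createIntervalDictionary a | none => PySem.Dict.empty)).contains "0" = notes.contains "d#" := contains_nti_single notes _ _ _ (by decide)
theorem pvC3_2 (notes : List String) : (notesToIntverals notes (match getRootNoteArray "d#" with | some a => createIntervalDictionary a | none => PySem.Dict.empty)).contains "M2" = notes.contains "f" := contains_nti_single notes _ _ _ (by decide)
theorem pvC3_3 (notes : List String) : (notesToIntverals notes (match getRootNoteArray "d#" with | some a => createIntervalDictionary a | none => PySem.Dict.empty)).contains "m3" = notes.contains "f#" := contains_nti_single notes _ _ _ (by decide)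
theorem pvC3_4 (notes : List String) : (notesToIntverals notes (match getRootNoteArray "d#" with | some a => createIntervalDictionary a | none => PySem.Dict.empty)).contains "M3" = notes.contains "g" := contains_nti_single notes _ _ _ (by decide)
theorem pvC3_5 (notes : List String) : (notesToIntverals notes (match getRootNoteArray "d#" with | some a => createIntervalDictionary a | none => PySem.Dict.empty)).contains "P4" = notes.contains "g#" := contains_nti_single notes _ _ _ (by decide)
theorem pvC3_6 (notes : List String) : (notesToIntverals notes (match getRootNoteArray "d#" with | some a => createIntervalDictionary a | none => PySem.Dict.empty)).contains "TT" = notes.contains "a" := contains_nti_single notes _ _ _ (by decide)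
theorem pvC3_7 (notes : List String) : (notesToIntverals notes (match getRootNoteArray "d#" with | some a => createIntervalDictionary a | none => PySem.Dict.empty)).contains "P5" = notes.contains "a#" := contains_nti_single notes _ _ _ (by decide)
theorem pvC3_8 (notes : List String) : (notesToIntverals notes (match getRootNoteArray "d#" with | some a => createIntervalDictionary a | none => PySem.Dict.empty)).contains "m6" = notes.contains "b" := contains_nti_single notes _ _ _ (by decide)
theorem pvC3_9 (notes : List String) : (notesToIntverals notes (match getRootNoteArray "d#" with | some a => createIntervalDictionary a | none => PySem.Dict.empty)).contains "M6" = notes.contains "c" := contains_nti_single notes _ _ _ (by decide)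
theorem pvC3_10 (notes : List String) : (notesToIntverals notes (match getRootNoteArray "d#" with | some a => createIntervalDictionary a | none => PySem.Dict.empty)).contains "m7" = notes.contains "c#" := contains_nti_single notes _ _ _ (by decide)
theorem pvC3_11 (notes : List String) : (notesToIntverals notes (match getRootNoteArray "d#" with | some a => createIntervalDictionary a | none => PySem.Dict.empty)).contains "M7" = notes.contains "d" := contains_nti_single notes _ _ _ (by decide)
theorem pvC4_0 (notes : List String) : (notesToIntverals notes (match getRootNoteArray "e" with | some a => createIntervalDictionary a | none => PySem.Dict.empty)).contains "0" = notes.contains "e" := contains_nti_single notes _ _ _ (by decide)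
theorem pvC4_2 (notes : List String) : (notesToIntverals notes (match getRootNoteArray "e" with | some a => createIntervalDictionary a | none => PySem.Dict.empty)).contains "M2" = notes.contains "f#" := contains_nti_single notes _ _ _ (by decide)
theorem pvC4_3 (notes : List String) : (notesToIntverals notes (match getRootNoteArray "e" with | some a => createIntervalDictionary a | none => PySem.Dict.empty)).contains "m3" = notes.contains "g" := contains_nti_single notes _ _ _ (by decide)
theorem pvC4_4 (notes : List String) : (notesToIntverals notes (match getRootNoteArray "e" with | some a => createIntervalDictionary a | none => PySem.Dict.empty)).contains "M3" = notes.contains "g#" := contains_nti_single notes _ _ _ (by decide)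
theorem pvC4_5 (notes : List String) : (notesToIntverals notes (match getRootNoteArray "e" with | some a => createIntervalDictionary a | none => PySem.Dict.empty)).contains "P4" = notes.contains "a" := contains_nti_single notes _ _ _ (by decide)
theorem pvC4_6 (notes : List String) : (notesToIntverals notes (match getRootNoteArray "e" with | some a => createIntervalDictionary a | none => PySem.Dict.empty)).contains "TT" = notes.contains "a#" := contains_nti_single notes _ _ _ (by decide)
theorem pvC4_7 (notes : List String) : (notesToIntverals notes (match getRootNoteArray "e" with | some a => createIntervalDictionary a | none => PySem.Dict.empty)).contains "P5" = notes.contains "b" := contains_nti_single notes _ _ _ (by decide)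
theorem pvC4_8 (notes : List String) : (notesToIntverals notes (match getRootNoteArray "e" with | some a => createIntervalDictionary a | none => PySem.Dict.empty)).contains "m6" = notes.contains "c" := contains_nti_single notes _ _ _ (by decide)
theorem pvC4_9 (notes : List String) : (notesToIntverals notes (match getRootNoteArray "e" with | some a => createIntervalDictionary a | none => PySem.Dict.empty)).contains "M6" = notes.contains "c#" := contains_nti_single notes _ _ _ (by decide)
theorem pvC4_10 (notes : List String) : (notesToIntverals notes (match getRootNoteArray "e" with | some a => createIntervalDictionary a | none => PySem.Dict.empty)).contains "m7" = notes.contains "d" := contains_nti_single notes _ _ _ (by decide)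
theorem pvC4_11 (notes : List String) : (notesToIntverals notes (match getRootNoteArray "e" with | some a => createIntervalDictionary a | none => PySem.Dict.empty)).contains "M7" = notes.contains "d#" := contains_nti_single notes _ _ _ (by decide)
theorem pvC5_0 (notes : List String) : (notesToIntverals notes (match getRootNoteArray "f" with | some a => createIntervalDictionary a | none => PySem.Dict.empty)).contains "0" = notes.contains "f" := contains_nti_single notes _ _ _ (by decide)
theorem pvC5_2 (notes : List String) : (notesToIntverals notes (match getRootNoteArray "f" with | some a => createIntervalDictionary a | none => PySem.Dict.empty)).contains "M2" = notes.contains "g" := contains_nti_single notes _ _ _ (by decide)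
theorem pvC5_3 (notes : List String) : (notesToIntverals notes (match getRootNoteArray "f" with | some a => createIntervalDictionary a | none => PySem.Dict.empty)).contains "m3" = notes.contains "g#" := contains_nti_single notes _ _ _ (by decide)
theorem pvC5_4 (notes : List String) : (notesToIntverals notes (match getRootNoteArray "f" with | some a => createIntervalDictionary a | none => PySem.Dict.empty)).contains "M3" = notes.contains "a" := contains_nti_single notes _ _ _ (by decide)
theorem pvC5_5 (notes : List String) : (notesToIntverals notes (match getRootNoteArray "f" with | some a => createIntervalDictionary a | none => PySem.Dict.empty)).contains "P4" = notes.contains "a#" := contains_nti_single notes _ _ _ (by decide)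
theorem pvC5_6 (notes : List String) : (notesToIntverals notes (match getRootNoteArray "f" with | some a => createIntervalDictionary a | none => PySem.Dict.empty)).contains "TT" = notes.contains "b" := contains_nti_single notes _ _ _ (by decide)
theorem pvC5_7 (notes : List String) : (notesToIntverals notes (match getRootNoteArray "f" with | some a => createIntervalDictionary a | none => PySem.Dict.empty)).contains "P5" = notes.contains "c" := contains_nti_single notes _ _ _ (by decide)
theorem pvC5_8 (notes : List String) : (notesToIntverals notes (match getRootNoteArray "f" with | some a => createIntervalDictionary a | none => PySem.Dict.empty)).contains "m6" = notes.contains "c#" := contains_nti_single notes _ _ _ (by decide)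
theorem pvC5_9 (notes : List String) : (notesToIntverals notes (match getRootNoteArray "f" with | some a => createIntervalDictionary a | none => PySem.Dict.empty)).contains "M6" = notes.contains "d" := contains_nti_single notes _ _ _ (by decide)
theorem pvC5_10 (notes : List String) : (notesToIntverals notes (match getRootNoteArray "f" with | some a => createIntervalDictionary a | none => PySem.Dict.empty)).contains "m7" = notes.contains "d#" := contains_nti_single notes _ _ _ (by decide)
theorem pvC5_11 (notes : List String) : (notesToIntverals notes (match getRootNoteArray "f" with | some a => createIntervalDictionary a | none => PySem.Dict.empty)).contains "M7" = notes.contains "e" := contains_nti_single notes _ _ _ (by decide)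
theorem pvC6_0 (notes : List String) : (notesToIntverals notes (match getRootNoteArray "f#" with | some a => createIntervalDictionary a | none => PySem.Dict.empty)).contains "0" = notes.contains "f#" := contains_nti_single notes _ _ _ (by decide)
theorem pvC6_2 (notes : List String) : (notesToIntverals notes (match getRootNoteArray "f#" with | some a => createIntervalDictionary a | none => PySem.Dict.empty)).contains "M2" = notes.contains "g#" := contains_nti_single notes _ _ _ (by decide)
theorem pvC6_3 (notes : List String) : (notesToIntverals notes (match getRootNoteArray "f#" with | some a => createIntervalDictionary a | none => PySem.Dict.empty)).contains "m3" = notes.contains "a" := contains_nti_single notes _ _ _ (by decide)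
theorem pvC6_4 (notes : List String) : (notesToIntverals notes (match getRootNoteArray "f#" with | some a => createIntervalDictionary a | none => PySem.Dict.empty)).contains "M3" = notes.contains "a#" := contains_nti_single notes _ _ _ (by decide)
theorem pvC6_5 (notes : List String) : (notesToIntverals notes (match getRootNoteArray "f#" with | some a => createIntervalDictionary a | none => PySem.Dict.empty)).contains "P4" = notes.contains "b" := contains_nti_single notes _ _ _ (by decide)
theorem pvC6_6 (notes : List String) : (notesToIntverals notes (match getRootNoteArray "f#" with | some a => createIntervalDictionary a | none => PySem.Dict.empty)).contains "TT" = notes.contains "c" := contains_nti_single notes _ _ _ (by decide)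
theorem pvC6_7 (notes : List String) : (notesToIntverals notes (match getRootNoteArray "f#" with | some a => createIntervalDictionary a | none => PySem.Dict.empty)).contains "P5" = notes.contains "c#" := contains_nti_single notes _ _ _ (by decide)
theorem pvC6_8 (notes : List String) : (notesToIntverals notes (match getRootNoteArray "f#" with | some a => createIntervalDictionary a | none => PySem.Dict.empty)).contains "m6" = notes.contains "d" := contains_nti_single notes _ _ _ (by decide)
theorem pvC6_9 (notes : List String) : (notesToIntverals notes (match getRootNoteArray "f#" with | some a => createIntervalDictionary a | none => PySem.Dict.empty)).contains "M6" = notes.contains "d#" := contains_nti_single notes _ _ _ (by decide)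
theorem pvC6_10 (notes : List String) : (notesToIntverals notes (match getRootNoteArray "f#" with | some a => createIntervalDictionary a | none => PySem.Dict.empty)).contains "m7" = notes.contains "e" := contains_nti_single notes _ _ _ (by decide)
theorem pvC6_11 (notes : List String) : (notesToIntverals notes (match getRootNoteArray "f#" with | some a => createIntervalDictionary a | none => PySem.Dict.empty)).contains "M7" = notes.contains "f" := contains_nti_single notes _ _ _ (by decide)
theorem pvC7_0 (notes : List String) : (notesToIntverals notes (match getRootNoteArray "g" with | some a => createIntervalDictionary a | none => PySem.Dict.empty)).contains "0" = notes.contains "g" := contains_nti_single notes _ _ _ (by decide)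
theorem pvC7_2 (notes : List String) : (notesToIntverals notes (match getRootNoteArray "g" with | some a => createIntervalDictionary a | none => PySem.Dict.empty)).contains "M2" = notes.contains "a" := contains_nti_single notes _ _ _ (by decide)
theorem pvC7_3 (notes : List String) : (notesToIntverals notes (match getRootNoteArray "g" with | some a => createIntervalDictionary a | none => PySem.Dict.empty)).contains "m3" = notes.contains "a#" := contains_nti_single notes _ _ _ (by decide)
theorem pvC7_4 (notes : List String) : (notesToIntverals notes (match getRootNoteArray "g" with | some a => createIntervalDictionary a | none => PySem.Dict.empty)).contains "M3" = notes.contains "b" := contains_nti_single notes _ _ _ (by decide)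
theorem pvC7_5 (notes : List String) : (notesToIntverals notes (match getRootNoteArray "g" with | some a => createIntervalDictionary a | none => PySem.Dict.empty)).contains "P4" = notes.contains "c" := contains_nti_single notes _ _ _ (by decide)
theorem pvC7_6 (notes : List String) : (notesToIntverals notes (match getRootNoteArray "g" with | some a => createIntervalDictionary a | none => PySem.Dict.empty)).contains "TT" = notes.contains "c#" := contains_nti_single notes _ _ _ (by decide)
theorem pvC7_7 (notes : List String) : (notesToIntverals notes (match getRootNoteArray "g" with | some a => createIntervalDictionary a | none => PySem.Dict.empty)).contains "P5" = notes.contains "d" := contains_nti_single notes _ _ _ (by decide)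
theorem pvC7_8 (notes : List String) : (notesToIntverals notes (match getRootNoteArray "g" with | some a => createIntervalDictionary a | none => PySem.Dict.empty)).contains "m6" = notes.contains "d#" := contains_nti_single notes _ _ _ (by decide)
theorem pvC7_9 (notes : List String) : (notesToIntverals notes (match getRootNoteArray "g" with | some a => createIntervalDictionary a | none => PySem.Dict.empty)).contains "M6" = notes.contains "e" := contains_nti_single notes _ _ _ (by decide)
theorem pvC7_10 (notes : List String) : (notesToIntverals notes (match getRootNoteArray "g" with | some a => createIntervalDictionary a | none => PySem.Dict.empty)).contains "m7" = notes.contains "f" := contains_nti_single notes _ _ _ (by decide)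
theorem pvC7_11 (notes : List String) : (notesToIntverals notes (match getRootNoteArray "g" with | some a => createIntervalDictionary a | none => PySem.Dict.empty)).contains "M7" = notes.contains "f#" := contains_nti_single notes _ _ _ (by decide)
theorem pvC8_0 (notes : List String) : (notesToIntverals notes (match getRootNoteArray "g#" with | some a => createIntervalDictionary a | none => PySem.Dict.empty)).contains "0" = notes.contains "g#" := contains_nti_single notes _ _ _ (by decide)
theorem pvC8_2 (notes : List String) : (notesToIntverals notes (match getRootNoteArray "g#" with | some a => createIntervalDictionary a | none => PySem.Dict.empty)).contains "M2" = notes.contains "a#" := contains_nti_single notes _ _ _ (by decide)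
theorem pvC8_3 (notes : List String) : (notesToIntverals notes (match getRootNoteArray "g#" with | some a => createIntervalDictionary a | none => PySem.Dict.empty)).contains "m3" = notes.contains "b" := contains_nti_single notes _ _ _ (by decide)
theorem pvC8_4 (notes : List String) : (notesToIntverals notes (match getRootNoteArray "g#" with | some a => createIntervalDictionary a | none => PySem.Dict.empty)).contains "M3" = notes.contains "c" := contains_nti_single notes _ _ _ (by decide)
theorem pvC8_5 (notes : List String) : (notesToIntverals notes (match getRootNoteArray "g#" with | some a => createIntervalDictionary a | none => PySem.Dict.empty)).contains "P4" = notes.contains "c#" := contains_nti_single notes _ _ _ (by decide)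
theorem pvC8_6 (notes : List String) : (notesToIntverals notes (match getRootNoteArray "g#" with | some a => createIntervalDictionary a | none => PySem.Dict.empty)).contains "TT" = notes.contains "d" := contains_nti_single notes _ _ _ (by decide)
theorem pvC8_7 (notes : List String) : (notesToIntverals notes (match getRootNoteArray "g#" with | some a => createIntervalDictionary a | none => PySem.Dict.empty)).contains "P5" = notes.contains "d#" := contains_nti_single notes _ _ _ (by decide)
theorem pvC8_8 (notes : List String) : (notesToIntverals notes (match getRootNoteArray "g#" with | some a => createIntervalDictionary a | none => PySem.Dict.empty)).contains "m6" = notes.contains "e" := contains_nti_single notes _ _ _ (by decide)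
theorem pvC8_9 (notes : List String) : (notesToIntverals notes (match getRootNoteArray "g#" with | some a => createIntervalDictionary a | none => PySem.Dict.empty)).contains "M6" = notes.contains "f" := contains_nti_single notes _ _ _ (by decide)
theorem pvC8_10 (notes : List String) : (notesToIntverals notes (match getRootNoteArray "g#" with | some a => createIntervalDictionary a | none => PySem.Dict.empty)).contains "m7" = notes.contains "f#" := contains_nti_single notes _ _ _ (by decide)
theorem pvC8_11 (notes : List String) : (notesToIntverals notes (match getRootNoteArray "g#" with | some a => createIntervalDictionary a | none => PySem.Dict.empty)).contains "M7" = notes.contains "g" := contains_nti_single notes _ _ _ (by decide)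
theorem pvC9_0 (notes : List String) : (notesToIntverals notes (match getRootNoteArray "a" with | some a => createIntervalDictionary a | none => PySem.Dict.empty)).contains "0" = notes.contains "a" := contains_nti_single notes _ _ _ (by decide)
theorem pvC9_2 (notes : List String) : (notesToIntverals notes (match getRootNoteArray "a" with | some a => createIntervalDictionary a | none => PySem.Dict.empty)).contains "M2" = notes.contains "b" := contains_nti_single notes _ _ _ (by decide)
theorem pvC9_3 (notes : List String) : (notesToIntverals notes (match getRootNoteArray "a" with | some a => createIntervalDictionary a | none => PySem.Dict.empty)).contains "m3" = notes.contains "c" := contains_nti_single notes _ _ _ (by decide)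
theorem pvC9_4 (notes : List String) : (notesToIntverals notes (match getRootNoteArray "a" with | some a => createIntervalDictionary a | none => PySem.Dict.empty)).contains "M3" = notes.contains "c#" := contains_nti_single notes _ _ _ (by decide)
theorem pvC9_5 (notes : List String) : (notesToIntverals notes (match getRootNoteArray "a" with | some a => createIntervalDictionary a | none => PySem.Dict.empty)).contains "P4" = notes.contains "d" := contains_nti_single notes _ _ _ (by decide)
theorem pvC9_6 (notes : List String) : (notesToIntverals notes (match getRootNoteArray "a" with | some a => createIntervalDictionary a | none => PySem.Dict.empty)).contains "TT" = notes.contains "d#" := contains_nti_single notes _ _ _ (by decide)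
theorem pvC9_7 (notes : List String) : (notesToIntverals notes (match getRootNoteArray "a" with | some a => createIntervalDictionary a | none => PySem.Dict.empty)).contains "P5" = notes.contains "e" := contains_nti_single notes _ _ _ (by decide)
theorem pvC9_8 (notes : List String) : (notesToIntverals notes (match getRootNoteArray "a" with | some a => createIntervalDictionary a | none => PySem.Dict.empty)).contains "m6" = notes.contains "f" := contains_nti_single notes _ _ _ (by decide)
theorem pvC9_9 (notes : List String) : (notesToIntverals notes (match getRootNoteArray "a" with | some a => createIntervalDictionary a | none => PySem.Dict.empty)).contains "M6" = notes.contains "f#" := contains_nti_single notes _ _ _ (by decide)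
theorem pvC9_10 (notes : List String) : (notesToIntverals notes (match getRootNoteArray "a" with | some a => createIntervalDictionary a | none => PySem.Dict.empty)).contains "m7" = notes.contains "g" := contains_nti_single notes _ _ _ (by decide)
theorem pvC9_11 (notes : List String) : (notesToIntverals notes (match getRootNoteArray "a" with | some a => createIntervalDictionary a | none => PySem.Dict.empty)).contains "M7" = notes.contains "g#" := contains_nti_single notes _ _ _ (by decide)
theorem pvC10_0 (notes : List String) : (notesToIntverals notes (match getRootNoteArray "a#" with | some a => createIntervalDictionary a | none => PySem.Dict.empty)).contains "0" = notes.contains "a#" := contains_nti_single notes _ _ _ (by decide)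
theorem pvC10_2 (notes : List String) : (notesToIntverals notes (match getRootNoteArray "a#" with | some a => createIntervalDictionary a | none => PySem.Dict.empty)).contains "M2" = notes.contains "c" := contains_nti_single notes _ _ _ (by decide)
theorem pvC10_3 (notes : List String) : (notesToIntverals notes (match getRootNoteArray "a#" with | some a => createIntervalDictionary a | none => PySem.Dict.empty)).contains "m3" = notes.contains "c#" := contains_nti_single notes _ _ _ (by decide)
theorem pvC10_4 (notes : List String) : (notesToIntverals notes (match getRootNoteArray "a#" with | some a => createIntervalDictionary a | none => PySem.Dict.empty)).contains "M3" = notes.contains "d" := contains_nti_single notes _ _ _ (by decide)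
theorem pvC10_5 (notes : List String) : (notesToIntverals notes (match getRootNoteArray "a#" with | some a => createIntervalDictionary a | none => PySem.Dict.empty)).contains "P4" = notes.contains "d#" := contains_nti_single notes _ _ _ (by decide)
theorem pvC10_6 (notes : List String) : (notesToIntverals notes (match getRootNoteArray "a#" with | some a => createIntervalDictionary a | none => PySem.Dict.empty)).contains "TT" = notes.contains "e" := contains_nti_single notes _ _ _ (by decide)
theorem pvC10_7 (notes : List String) : (notesToIntverals notes (match getRootNoteArray "a#" with | some a => createIntervalDictionary a | none => PySem.Dict.empty)).contains "P5" = notes.contains "f" := contains_nti_single notes _ _ _ (by decide)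
theorem pvC10_8 (notes : List String) : (notesToIntverals notes (match getRootNoteArray "a#" with | some a => createIntervalDictionary a | none => PySem.Dict.empty)).contains "m6" = notes.contains "f#" := contains_nti_single notes _ _ _ (by decide)
theorem pvC10_9 (notes : List String) : (notesToIntverals notes (match getRootNoteArray "a#" with | some a => createIntervalDictionary a | none => PySem.Dict.empty)).contains "M6" = notes.contains "g" := contains_nti_single notes _ _ _ (by decide)
theorem pvC10_10 (notes : List String) : (notesToIntverals notes (match getRootNoteArray "a#" with | some a => createIntervalDictionary a | none => PySem.Dict.empty)).contains "m7" = notes.contains "g#" := contains_nti_single notes _ _ _ (by decide)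
theorem pvC10_11 (notes : List String) : (notesToIntverals notes (match getRootNoteArray "a#" with | some a => createIntervalDictionary a | none => PySem.Dict.empty)).contains "M7" = notes.contains "a" := contains_nti_single notes _ _ _ (by decide)
theorem pvC11_0 (notes : List String) : (notesToIntverals notes (match getRootNoteArray "b" with | some a => createIntervalDictionary a | none => PySem.Dict.empty)).contains "0" = notes.contains "b" := contains_nti_single notes _ _ _ (by decide)
theorem pvC11_2 (notes : List String) : (notesToIntverals notes (match getRootNoteArray "b" with | some a => createIntervalDictionary a | none => PySem.Dict.empty)).contains "M2" = notes.contains "c#" := contains_nti_single notes _ _ _ (by decide)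
theorem pvC11_3 (notes : List String) : (notesToIntverals notes (match getRootNoteArray "b" with | some a => createIntervalDictionary a | none => PySem.Dict.empty)).contains "m3" = notes.contains "d" := contains_nti_single notes _ _ _ (by decide)
theorem pvC11_4 (notes : List String) : (notesToIntverals notes (match getRootNoteArray "b" with | some a => createIntervalDictionary a | none => PySem.Dict.empty)).contains "M3" = notes.contains "d#" := contains_nti_single notes _ _ _ (by decide)
theorem pvC11_5 (notes : List String) : (notesToIntverals notes (match getRootNoteArray "b" with | some a => createIntervalDictionary a | none => PySem.Dict.empty)).contains "P4" = notes.contains "e" := contains_nti_single notes _ _ _ (by decide)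
theorem pvC11_6 (notes : List String) : (notesToIntverals notes (match getRootNoteArray "b" with | some a => createIntervalDictionary a | none => PySem.Dict.empty)).contains "TT" = notes.contains "f" := contains_nti_single notes _ _ _ (by decide)
theorem pvC11_7 (notes : List String) : (notesToIntverals notes (match getRootNoteArray "b" with | some a => createIntervalDictionary a | none => PySem.Dict.empty)).contains "P5" = notes.contains "f#" := contains_nti_single notes _ _ _ (by decide)
theorem pvC11_8 (notes : List String) : (notesToIntverals notes (match getRootNoteArray "b" with | some a => createIntervalDictionary a | none => PySem.Dict.empty)).contains "m6" = notes.contains "g" := contains_nti_single notes _ _ _ (by decide)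
theorem pvC11_9 (notes : List String) : (notesToIntverals notes (match getRootNoteArray "b" with | some a => createIntervalDictionary a | none => PySem.Dict.empty)).contains "M6" = notes.contains "g#" := contains_nti_single notes _ _ _ (by decide)
theorem pvC11_10 (notes : List String) : (notesToIntverals notes (match getRootNoteArray "b" with | some a => createIntervalDictionary a | none => PySem.Dict.empty)).contains "m7" = notes.contains "a" := contains_nti_single notes _ _ _ (by decide)
theorem pvC11_11 (notes : List String) : (notesToIntverals notes (match getRootNoteArray "b" with | some a => createIntervalDictionary a | none => PySem.Dict.empty)).contains "M7" = notes.contains "a#" := contains_nti_single notes _ _ _ (by decide)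
-- the combined chord dictionary, entry by entry
theorem pvT0 : PySem.Dict.getD getIntervalDictionary "Major" [] = ["0", "M3", "P5"] := by decide
theorem pvT1 : PySem.Dict.getD getIntervalDictionary "Minor" [] = ["0", "m3", "P5"] := by decide
theorem pvT2 : PySem.Dict.getD getIntervalDictionary "Augmented" [] = ["0", "M3", "m6"] := by decide
theorem pvT3 : PySem.Dict.getD getIntervalDictionary "Diminished" [] = ["0", "m3", "TT"] := by decide
theorem pvT4 : PySem.Dict.getD getIntervalDictionary "Sus 2" [] = ["0", "M2", "P5"] := by decide
theorem pvT5 : PySem.Dict.getD getIntervalDictionary "Sus 4" [] = ["0", "P4", "P5"] := by decide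
theorem pvT6 : PySem.Dict.getD getIntervalDictionary "Major 7" [] = ["0", "M3", "P5", "M7"] := by decide
theorem pvT7 : PySem.Dict.getD getIntervalDictionary "Minor 7" [] = ["0", "m3", "P5", "m7"] := by decide
theorem pvT8 : PySem.Dict.getD getIntervalDictionary "Dominant 7" [] = ["0", "M3", "P5", "m7"] := by decide
theorem pvT9 : PySem.Dict.getD getIntervalDictionary "Diminished 7" [] = ["0", "m3", "TT", "M6"] := by decide
theorem pvT10 : PySem.Dict.getD getIntervalDictionary "Minor(Maj 7)" [] = ["0", "m3", "P5", "M7"] := by decide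
theorem pvT11 : PySem.Dict.getD getIntervalDictionary "Minor 7 b5" [] = ["0", "m3", "TT", "m7"] := by decide
theorem pvT12 : PySem.Dict.getD getIntervalDictionary "6" [] = ["0", "M3", "P5", "M6"] := by decide
theorem pvT13 : PySem.Dict.getD getIntervalDictionary "Major 9" [] = ["0", "M3", "P5", "M7", "M2"] := by decide
theorem pvT14 : PySem.Dict.getD getIntervalDictionary "Minor 9" [] = ["0", "m3", "P5", "m7", "M2"] := by decide
theorem pvT15 : PySem.Dict.getD getIntervalDictionary "9" [] = ["0", "M3", "P5", "m7", "M2"] := by decide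
theorem pvT16 : PySem.Dict.getD getIntervalDictionary "6/9" [] = ["0", "M3", "P5", "M6", "M2"] := by decide
theorem pvT17 : PySem.Dict.getD getIntervalDictionary "11" [] = ["0", "M3", "P5", "m7", "P4"] := by decide
theorem pvT18 : PySem.Dict.getD getIntervalDictionary "13" [] = ["0", "M3", "P5", "m7", "M6"] := by decide
-- B's index arithmetic at every (root, offset) pair that occurs
theorem pvM0_0 : PySem.Int.mod ((0:Int) + 0) 12 = 0 := by decide
theorem pvM0_2 : PySem.Int.mod ((0:Int) + 2) 12 = 2 := by decide
theorem pvM0_3 : PySem.Int.mod ((0:Int) + 3) 12 = 3 := by decide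
theorem pvM0_4 : PySem.Int.mod ((0:Int) + 4) 12 = 4 := by decide
theorem pvM0_5 : PySem.Int.mod ((0:Int) + 5) 12 = 5 := by decide
theorem pvM0_6 : PySem.Int.mod ((0:Int) + 6) 12 = 6 := by decide
theorem pvM0_7 : PySem.Int.mod ((0:Int) + 7) 12 = 7 := by decide
theorem pvM0_8 : PySem.Int.mod ((0:Int) + 8) 12 = 8 := by decide
theorem pvM0_9 : PySem.Int.mod ((0:Int) + 9) 12 = 9 := by decide
theorem pvM0_10 : PySem.Int.mod ((0:Int) + 10) 12 = 10 := by decide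
theorem pvM0_11 : PySem.Int.mod ((0:Int) + 11) 12 = 11 := by decide
theorem pvM1_0 : PySem.Int.mod ((1:Int) + 0) 12 = 1 := by decide
theorem pvM1_2 : PySem.Int.mod ((1:Int) + 2) 12 = 3 := by decide
theorem pvM1_3 : PySem.Int.mod ((1:Int) + 3) 12 = 4 := by decide
theorem pvM1_4 : PySem.Int.mod ((1:Int) + 4) 12 = 5 := by decide
theorem pvM1_5 : PySem.Int.mod ((1:Int) + 5) 12 = 6 := by decide
theorem pvM1_6 : PySem.Int.mod ((1:Int) + 6) 12 = 7 := by decide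
theorem pvM1_7 : PySem.Int.mod ((1:Int) + 7) 12 = 8 := by decide
theorem pvM1_8 : PySem.Int.mod ((1:Int) + 8) 12 = 9 := by decide
theorem pvM1_9 : PySem.Int.mod ((1:Int) + 9) 12 = 10 := by decide
theorem pvM1_10 : PySem.Int.mod ((1:Int) + 10) 12 = 11 := by decide
theorem pvM1_11 : PySem.Int.mod ((1:Int) + 11) 12 = 0 := by decide
theorem pvM2_0 : PySem.Int.mod ((2:Int) + 0) 12 = 2 := by decide
theorem pvM2_2 : PySem.Int.mod ((2:Int) + 2) 12 = 4 := by decide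
theorem pvM2_3 : PySem.Int.mod ((2:Int) + 3) 12 = 5 := by decide
theorem pvM2_4 : PySem.Int.mod ((2:Int) + 4) 12 = 6 := by decide
theorem pvM2_5 : PySem.Int.mod ((2:Int) + 5) 12 = 7 := by decide
theorem pvM2_6 : PySem.Int.mod ((2:Int) + 6) 12 = 8 := by decide
theorem pvM2_7 : PySem.Int.mod ((2:Int) + 7) 12 = 9 := by decide
theorem pvM2_8 : PySem.Int.mod ((2:Int) + 8) 12 = 10 := by decide
theorem pvM2_9 : PySem.Int.mod ((2:Int) + 9) 12 = 11 := by decide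
theorem pvM2_10 : PySem.Int.mod ((2:Int) + 10) 12 = 0 := by decide
theorem pvM2_11 : PySem.Int.mod ((2:Int) + 11) 12 = 1 := by decide
theorem pvM3_0 : PySem.Int.mod ((3:Int) + 0) 12 = 3 := by decide
theorem pvM3_2 : PySem.Int.mod ((3:Int) + 2) 12 = 5 := by decide
theorem pvM3_3 : PySem.Int.mod ((3:Int) + 3) 12 = 6 := by decide
theorem pvM3_4 : PySem.Int.mod ((3:Int) + 4) 12 = 7 := by decide
theorem pvM3_5 : PySem.Int.mod ((3:Int) + 5) 12 = 8 := by decide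
theorem pvM3_6 : PySem.Int.mod ((3:Int) + 6) 12 = 9 := by decide
theorem pvM3_7 : PySem.Int.mod ((3:Int) + 7) 12 = 10 := by decide
theorem pvM3_8 : PySem.Int.mod ((3:Int) + 8) 12 = 11 := by decide
theorem pvM3_9 : PySem.Int.mod ((3:Int) + 9) 12 = 0 := by decide
theorem pvM3_10 : PySem.Int.mod ((3:Int) + 10) 12 = 1 := by decide
theorem pvM3_11 : PySem.Int.mod ((3:Int) + 11) 12 = 2 := by decide
theorem pvM4_0 : PySem.Int.mod ((4:Int) + 0) 12 = 4 := by decide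
theorem pvM4_2 : PySem.Int.mod ((4:Int) + 2) 12 = 6 := by decide
theorem pvM4_3 : PySem.Int.mod ((4:Int) + 3) 12 = 7 := by decide
theorem pvM4_4 : PySem.Int.mod ((4:Int) + 4) 12 = 8 := by decide
theorem pvM4_5 : PySem.Int.mod ((4:Int) + 5) 12 = 9 := by decide
theorem pvM4_6 : PySem.Int.mod ((4:Int) + 6) 12 = 10 := by decide
theorem pvM4_7 : PySem.Int.mod ((4:Int) + 7) 12 = 11 := by decide
theorem pvM4_8 : PySem.Int.mod ((4:Int) + 8) 12 = 0 := by decide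
theorem pvM4_9 : PySem.Int.mod ((4:Int) + 9) 12 = 1 := by decide
theorem pvM4_10 : PySem.Int.mod ((4:Int) + 10) 12 = 2 := by decide
theorem pvM4_11 : PySem.Int.mod ((4:Int) + 11) 12 = 3 := by decide
theorem pvM5_0 : PySem.Int.mod ((5:Int) + 0) 12 = 5 := by decide
theorem pvM5_2 : PySem.Int.mod ((5:Int) + 2) 12 = 7 := by decide
theorem pvM5_3 : PySem.Int.mod ((5:Int) + 3) 12 = 8 := by decide
theorem pvM5_4 : PySem.Int.mod ((5:Int) + 4) 12 = 9 := by decide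
theorem pvM5_5 : PySem.Int.mod ((5:Int) + 5) 12 = 10 := by decide
theorem pvM5_6 : PySem.Int.mod ((5:Int) + 6) 12 = 11 := by decide
theorem pvM5_7 : PySem.Int.mod ((5:Int) + 7) 12 = 0 := by decide
theorem pvM5_8 : PySem.Int.mod ((5:Int) + 8) 12 = 1 := by decide
theorem pvM5_9 : PySem.Int.mod ((5:Int) + 9) 12 = 2 := by decide
theorem pvM5_10 : PySem.Int.mod ((5:Int) + 10) 12 = 3 := by decide
theorem pvM5_11 : PySem.Int.mod ((5:Int) + 11) 12 = 4 := by decide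
theorem pvM6_0 : PySem.Int.mod ((6:Int) + 0) 12 = 6 := by decide
theorem pvM6_2 : PySem.Int.mod ((6:Int) + 2) 12 = 8 := by decide
theorem pvM6_3 : PySem.Int.mod ((6:Int) + 3) 12 = 9 := by decide
theorem pvM6_4 : PySem.Int.mod ((6:Int) + 4) 12 = 10 := by decide
theorem pvM6_5 : PySem.Int.mod ((6:Int) + 5) 12 = 11 := by decide
theorem pvM6_6 : PySem.Int.mod ((6:Int) + 6) 12 = 0 := by decide
theorem pvM6_7 : PySem.Int.mod ((6:Int) + 7) 12 = 1 := by decide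
theorem pvM6_8 : PySem.Int.mod ((6:Int) + 8) 12 = 2 := by decide
theorem pvM6_9 : PySem.Int.mod ((6:Int) + 9) 12 = 3 := by decide
theorem pvM6_10 : PySem.Int.mod ((6:Int) + 10) 12 = 4 := by decide
theorem pvM6_11 : PySem.Int.mod ((6:Int) + 11) 12 = 5 := by decide
theorem pvM7_0 : PySem.Int.mod ((7:Int) + 0) 12 = 7 := by decide
theorem pvM7_2 : PySem.Int.mod ((7:Int) + 2) 12 = 9 := by decide
theorem pvM7_3 : PySem.Int.mod ((7:Int) + 3) 12 = 10 := by decide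
theorem pvM7_4 : PySem.Int.mod ((7:Int) + 4) 12 = 11 := by decide
theorem pvM7_5 : PySem.Int.mod ((7:Int) + 5) 12 = 0 := by decide
theorem pvM7_6 : PySem.Int.mod ((7:Int) + 6) 12 = 1 := by decide
theorem pvM7_7 : PySem.Int.mod ((7:Int) + 7) 12 = 2 := by decide
theorem pvM7_8 : PySem.Int.mod ((7:Int) + 8) 12 = 3 := by decide
theorem pvM7_9 : PySem.Int.mod ((7:Int) + 9) 12 = 4 := by decide
theorem pvM7_10 : PySem.Int.mod ((7:Int) + 10) 12 = 5 := by decide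
theorem pvM7_11 : PySem.Int.mod ((7:Int) + 11) 12 = 6 := by decide
theorem pvM8_0 : PySem.Int.mod ((8:Int) + 0) 12 = 8 := by decide
theorem pvM8_2 : PySem.Int.mod ((8:Int) + 2) 12 = 10 := by decide
theorem pvM8_3 : PySem.Int.mod ((8:Int) + 3) 12 = 11 := by decide
theorem pvM8_4 : PySem.Int.mod ((8:Int) + 4) 12 = 0 := by decide
theorem pvM8_5 : PySem.Int.mod ((8:Int) + 5) 12 = 1 := by decide
theorem pvM8_6 : PySem.Int.mod ((8:Int) + 6) 12 = 2 := by decide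
theorem pvM8_7 : PySem.Int.mod ((8:Int) + 7) 12 = 3 := by decide
theorem pvM8_8 : PySem.Int.mod ((8:Int) + 8) 12 = 4 := by decide
theorem pvM8_9 : PySem.Int.mod ((8:Int) + 9) 12 = 5 := by decide
theorem pvM8_10 : PySem.Int.mod ((8:Int) + 10) 12 = 6 := by decide
theorem pvM8_11 : PySem.Int.mod ((8:Int) + 11) 12 = 7 := by decide
theorem pvM9_0 : PySem.Int.mod ((9:Int) + 0) 12 = 9 := by decide
theorem pvM9_2 : PySem.Int.mod ((9:Int) + 2) 12 = 11 := by decide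
theorem pvM9_3 : PySem.Int.mod ((9:Int) + 3) 12 = 0 := by decide
theorem pvM9_4 : PySem.Int.mod ((9:Int) + 4) 12 = 1 := by decide
theorem pvM9_5 : PySem.Int.mod ((9:Int) + 5) 12 = 2 := by decide
theorem pvM9_6 : PySem.Int.mod ((9:Int) + 6) 12 = 3 := by decide
theorem pvM9_7 : PySem.Int.mod ((9:Int) + 7) 12 = 4 := by decide
theorem pvM9_8 : PySem.Int.mod ((9:Int) + 8) 12 = 5 := by decide
theorem pvM9_9 : PySem.Int.mod ((9:Int) + 9) 12 = 6 := by decide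
theorem pvM9_10 : PySem.Int.mod ((9:Int) + 10) 12 = 7 := by decide
theorem pvM9_11 : PySem.Int.mod ((9:Int) + 11) 12 = 8 := by decide
theorem pvM10_0 : PySem.Int.mod ((10:Int) + 0) 12 = 10 := by decide
theorem pvM10_2 : PySem.Int.mod ((10:Int) + 2) 12 = 0 := by decide
theorem pvM10_3 : PySem.Int.mod ((10:Int) + 3) 12 = 1 := by decide
theorem pvM10_4 : PySem.Int.mod ((10:Int) + 4) 12 = 2 := by decide
theorem pvM10_5 : PySem.Int.mod ((10:Int) + 5) 12 = 3 := by decide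
theorem pvM10_6 : PySem.Int.mod ((10:Int) + 6) 12 = 4 := by decide
theorem pvM10_7 : PySem.Int.mod ((10:Int) + 7) 12 = 5 := by decide
theorem pvM10_8 : PySem.Int.mod ((10:Int) + 8) 12 = 6 := by decide
theorem pvM10_9 : PySem.Int.mod ((10:Int) + 9) 12 = 7 := by decide
theorem pvM10_10 : PySem.Int.mod ((10:Int) + 10) 12 = 8 := by decide
theorem pvM10_11 : PySem.Int.mod ((10:Int) + 11) 12 = 9 := by decide
theorem pvM11_0 : PySem.Int.mod ((11:Int) + 0) 12 = 11 := by decide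
theorem pvM11_2 : PySem.Int.mod ((11:Int) + 2) 12 = 1 := by decide
theorem pvM11_3 : PySem.Int.mod ((11:Int) + 3) 12 = 2 := by decide
theorem pvM11_4 : PySem.Int.mod ((11:Int) + 4) 12 = 3 := by decide
theorem pvM11_5 : PySem.Int.mod ((11:Int) + 5) 12 = 4 := by decide
theorem pvM11_6 : PySem.Int.mod ((11:Int) + 6) 12 = 5 := by decide
theorem pvM11_7 : PySem.Int.mod ((11:Int) + 7) 12 = 6 := by decide
theorem pvM11_8 : PySem.Int.mod ((11:Int) + 8) 12 = 7 := by decide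
theorem pvM11_9 : PySem.Int.mod ((11:Int) + 9) 12 = 8 := by decide
theorem pvM11_10 : PySem.Int.mod ((11:Int) + 10) 12 = 9 := by decide
theorem pvM11_11 : PySem.Int.mod ((11:Int) + 11) 12 = 10 := by decide
-- the twelve root rows
theorem pvRow0 (notes : List String) :
    intervalsToChords (notesToIntverals notes (match getRootNoteArray "c" with | some a => createIntervalDictionary a | none => PySem.Dict.empty)) =
    (altChords.filter (fun c => c.2.all (fun o => (PySem.List.pyGet? (altAllNotes.map (fun n => notes.contains n)) (PySem.Int.mod ((0:Int) + o) 12)).getD false))).map (fun c => c.1) := by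
  apply row_eq
  intro c hc
  simp only [altChords, List.mem_cons, List.not_mem_nil, or_false] at hc
  rcases hc with rfl|rfl|rfl|rfl|rfl|rfl|rfl|rfl|rfl|rfl|rfl|rfl|rfl|rfl|rfl|rfl|rfl|rfl|rfl
  all_goals simp only [checkIntervalMatch, List.all_cons, List.all_nil, Bool.and_true, pvT0, pvT1, pvT2, pvT3, pvT4, pvT5, pvT6, pvT7, pvT8, pvT9, pvT10, pvT11, pvT12, pvT13, pvT14, pvT15, pvT16, pvT17, pvT18, pvM0_0, pvM0_2, pvM0_3, pvM0_4, pvM0_5, pvM0_6, pvM0_7, pvM0_8, pvM0_9, pvM0_10, pvM0_11, pvC0_0, pvC0_2, pvC0_3, pvC0_4, pvC0_5, pvC0_6, pvC0_7, pvC0_8, pvC0_9, pvC0_10, pvC0_11, pvHp0, pvHp2, pvHp3, pvHp4, pvHp5, pvHp6, pvHp7, pvHp8, pvHp9, pvHp10, pvHp11]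
theorem pvRow1 (notes : List String) :
    intervalsToChords (notesToIntverals notes (match getRootNoteArray "c#" with | some a => createIntervalDictionary a | none => PySem.Dict.empty)) =
    (altChords.filter (fun c => c.2.all (fun o => (PySem.List.pyGet? (altAllNotes.map (fun n => notes.contains n)) (PySem.Int.mod ((1:Int) + o) 12)).getD false))).map (fun c => c.1) := by
  apply row_eq
  intro c hc
  simp only [altChords, List.mem_cons, List.not_mem_nil, or_false] at hc
  rcases hc with rfl|rfl|rfl|rfl|rfl|rfl|rfl|rfl|rfl|rfl|rfl|rfl|rfl|rfl|rfl|rfl|rfl|rfl|rfl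
  all_goals simp only [checkIntervalMatch, List.all_cons, List.all_nil, Bool.and_true, pvT0, pvT1, pvT2, pvT3, pvT4, pvT5, pvT6, pvT7, pvT8, pvT9, pvT10, pvT11, pvT12, pvT13, pvT14, pvT15, pvT16, pvT17, pvT18, pvM1_0, pvM1_2, pvM1_3, pvM1_4, pvM1_5, pvM1_6, pvM1_7, pvM1_8, pvM1_9, pvM1_10, pvM1_11, pvC1_0, pvC1_2, pvC1_3, pvC1_4, pvC1_5, pvC1_6, pvC1_7, pvC1_8, pvC1_9, pvC1_10, pvC1_11, pvHp1, pvHp3, pvHp4, pvHp5, pvHp6, pvHp7, pvHp8, pvHp9, pvHp10, pvHp11, pvHp0]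
theorem pvRow2 (notes : List String) :
    intervalsToChords (notesToIntverals notes (match getRootNoteArray "d" with | some a => createIntervalDictionary a | none => PySem.Dict.empty)) =
    (altChords.filter (fun c => c.2.all (fun o => (PySem.List.pyGet? (altAllNotes.map (fun n => notes.contains n)) (PySem.Int.mod ((2:Int) + o) 12)).getD false))).map (fun c => c.1) := by
  apply row_eq
  intro c hc
  simp only [altChords, List.mem_cons, List.not_mem_nil, or_false] at hc
  rcases hc with rfl|rfl|rfl|rfl|rfl|rfl|rfl|rfl|rfl|rfl|rfl|rfl|rfl|rfl|rfl|rfl|rfl|rfl|rfl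
  all_goals simp only [checkIntervalMatch, List.all_cons, List.all_nil, Bool.and_true, pvT0, pvT1, pvT2, pvT3, pvT4, pvT5, pvT6, pvT7, pvT8, pvT9, pvT10, pvT11, pvT12, pvT13, pvT14, pvT15, pvT16, pvT17, pvT18, pvM2_0, pvM2_2, pvM2_3, pvM2_4, pvM2_5, pvM2_6, pvM2_7, pvM2_8, pvM2_9, pvM2_10, pvM2_11, pvC2_0, pvC2_2, pvC2_3, pvC2_4, pvC2_5, pvC2_6, pvC2_7, pvC2_8, pvC2_9, pvC2_10, pvC2_11, pvHp2, pvHp4, pvHp5, pvHp6, pvHp7, pvHp8, pvHp9, pvHp10, pvHp11, pvHp0, pvHp1]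
theorem pvRow3 (notes : List String) :
    intervalsToChords (notesToIntverals notes (match getRootNoteArray "d#" with | some a => createIntervalDictionary a | none => PySem.Dict.empty)) =
    (altChords.filter (fun c => c.2.all (fun o => (PySem.List.pyGet? (altAllNotes.map (fun n => notes.contains n)) (PySem.Int.mod ((3:Int) + o) 12)).getD false))).map (fun c => c.1) := by
  apply row_eq
  intro c hc
  simp only [altChords, List.mem_cons, List.not_mem_nil, or_false] at hc
  rcases hc with rfl|rfl|rfl|rfl|rfl|rfl|rfl|rfl|rfl|rfl|rfl|rfl|rfl|rfl|rfl|rfl|rfl|rfl|rfl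
  all_goals simp only [checkIntervalMatch, List.all_cons, List.all_nil, Bool.and_true, pvT0, pvT1, pvT2, pvT3, pvT4, pvT5, pvT6, pvT7, pvT8, pvT9, pvT10, pvT11, pvT12, pvT13, pvT14, pvT15, pvT16, pvT17, pvT18, pvM3_0, pvM3_2, pvM3_3, pvM3_4, pvM3_5, pvM3_6, pvM3_7, pvM3_8, pvM3_9, pvM3_10, pvM3_11, pvC3_0, pvC3_2, pvC3_3, pvC3_4, pvC3_5, pvC3_6, pvC3_7, pvC3_8, pvC3_9, pvC3_10, pvC3_11, pvHp3, pvHp5, pvHp6, pvHp7, pvHp8, pvHp9, pvHp10, pvHp11, pvHp0, pvHp1, pvHp2]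
theorem pvRow4 (notes : List String) :
    intervalsToChords (notesToIntverals notes (match getRootNoteArray "e" with | some a => createIntervalDictionary a | none => PySem.Dict.empty)) =
    (altChords.filter (fun c => c.2.all (fun o => (PySem.List.pyGet? (altAllNotes.map (fun n => notes.contains n)) (PySem.Int.mod ((4:Int) + o) 12)).getD false))).map (fun c => c.1) := by
  apply row_eq
  intro c hc
  simp only [altChords, List.mem_cons, List.not_mem_nil, or_false] at hc
  rcases hc with rfl|rfl|rfl|rfl|rfl|rfl|rfl|rfl|rfl|rfl|rfl|rfl|rfl|rfl|rfl|rfl|rfl|rfl|rfl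
  all_goals simp only [checkIntervalMatch, List.all_cons, List.all_nil, Bool.and_true, pvT0, pvT1, pvT2, pvT3, pvT4, pvT5, pvT6, pvT7, pvT8, pvT9, pvT10, pvT11, pvT12, pvT13, pvT14, pvT15, pvT16, pvT17, pvT18, pvM4_0, pvM4_2, pvM4_3, pvM4_4, pvM4_5, pvM4_6, pvM4_7, pvM4_8, pvM4_9, pvM4_10, pvM4_11, pvC4_0, pvC4_2, pvC4_3, pvC4_4, pvC4_5, pvC4_6, pvC4_7, pvC4_8, pvC4_9, pvC4_10, pvC4_11, pvHp4, pvHp6, pvHp7, pvHp8, pvHp9, pvHp10, pvHp11, pvHp0, pvHp1, pvHp2, pvHp3]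
theorem pvRow5 (notes : List String) :
    intervalsToChords (notesToIntverals notes (match getRootNoteArray "f" with | some a => createIntervalDictionary a | none => PySem.Dict.empty)) =
    (altChords.filter (fun c => c.2.all (fun o => (PySem.List.pyGet? (altAllNotes.map (fun n => notes.contains n)) (PySem.Int.mod ((5:Int) + o) 12)).getD false))).map (fun c => c.1) := by
  apply row_eq
  intro c hc
  simp only [altChords, List.mem_cons, List.not_mem_nil, or_false] at hc
  rcases hc with rfl|rfl|rfl|rfl|rfl|rfl|rfl|rfl|rfl|rfl|rfl|rfl|rfl|rfl|rfl|rfl|rfl|rfl|rfl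
  all_goals simp only [checkIntervalMatch, List.all_cons, List.all_nil, Bool.and_true, pvT0, pvT1, pvT2, pvT3, pvT4, pvT5, pvT6, pvT7, pvT8, pvT9, pvT10, pvT11, pvT12, pvT13, pvT14, pvT15, pvT16, pvT17, pvT18, pvM5_0, pvM5_2, pvM5_3, pvM5_4, pvM5_5, pvM5_6, pvM5_7, pvM5_8, pvM5_9, pvM5_10, pvM5_11, pvC5_0, pvC5_2, pvC5_3, pvC5_4, pvC5_5, pvC5_6, pvC5_7, pvC5_8, pvC5_9, pvC5_10, pvC5_11, pvHp5, pvHp7, pvHp8, pvHp9, pvHp10, pvHp11, pvHp0, pvHp1, pvHp2, pvHp3, pvHp4]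
theorem pvRow6 (notes : List String) :
    intervalsToChords (notesToIntverals notes (match getRootNoteArray "f#" with | some a => createIntervalDictionary a | none => PySem.Dict.empty)) =
    (altChords.filter (fun c => c.2.all (fun o => (PySem.List.pyGet? (altAllNotes.map (fun n => notes.contains n)) (PySem.Int.mod ((6:Int) + o) 12)).getD false))).map (fun c => c.1) := by
  apply row_eq
  intro c hc
  simp only [altChords, List.mem_cons, List.not_mem_nil, or_false] at hc
  rcases hc with rfl|rfl|rfl|rfl|rfl|rfl|rfl|rfl|rfl|rfl|rfl|rfl|rfl|rfl|rfl|rfl|rfl|rfl|rfl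
  all_goals simp only [checkIntervalMatch, List.all_cons, List.all_nil, Bool.and_true, pvT0, pvT1, pvT2, pvT3, pvT4, pvT5, pvT6, pvT7, pvT8, pvT9, pvT10, pvT11, pvT12, pvT13, pvT14, pvT15, pvT16, pvT17, pvT18, pvM6_0, pvM6_2, pvM6_3, pvM6_4, pvM6_5, pvM6_6, pvM6_7, pvM6_8, pvM6_9, pvM6_10, pvM6_11, pvC6_0, pvC6_2, pvC6_3, pvC6_4, pvC6_5, pvC6_6, pvC6_7, pvC6_8, pvC6_9, pvC6_10, pvC6_11, pvHp6, pvHp8, pvHp9, pvHp10, pvHp11, pvHp0, pvHp1, pvHp2, pvHp3, pvHp4, pvHp5]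
theorem pvRow7 (notes : List String) :
    intervalsToChords (notesToIntverals notes (match getRootNoteArray "g" with | some a => createIntervalDictionary a | none => PySem.Dict.empty)) =
    (altChords.filter (fun c => c.2.all (fun o => (PySem.List.pyGet? (altAllNotes.map (fun n => notes.contains n)) (PySem.Int.mod ((7:Int) + o) 12)).getD false))).map (fun c => c.1) := by
  apply row_eq
  intro c hc
  simp only [altChords, List.mem_cons, List.not_mem_nil, or_false] at hc
  rcases hc with rfl|rfl|rfl|rfl|rfl|rfl|rfl|rfl|rfl|rfl|rfl|rfl|rfl|rfl|rfl|rfl|rfl|rfl|rfl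
  all_goals simp only [checkIntervalMatch, List.all_cons, List.all_nil, Bool.and_true, pvT0, pvT1, pvT2, pvT3, pvT4, pvT5, pvT6, pvT7, pvT8, pvT9, pvT10, pvT11, pvT12, pvT13, pvT14, pvT15, pvT16, pvT17, pvT18, pvM7_0, pvM7_2, pvM7_3, pvM7_4, pvM7_5, pvM7_6, pvM7_7, pvM7_8, pvM7_9, pvM7_10, pvM7_11, pvC7_0, pvC7_2, pvC7_3, pvC7_4, pvC7_5, pvC7_6, pvC7_7, pvC7_8, pvC7_9, pvC7_10, pvC7_11, pvHp7, pvHp9, pvHp10, pvHp11, pvHp0, pvHp1, pvHp2, pvHp3, pvHp4, pvHp5, pvHp6]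
theorem pvRow8 (notes : List String) :
    intervalsToChords (notesToIntverals notes (match getRootNoteArray "g#" with | some a => createIntervalDictionary a | none => PySem.Dict.empty)) =
    (altChords.filter (fun c => c.2.all (fun o => (PySem.List.pyGet? (altAllNotes.map (fun n => notes.contains n)) (PySem.Int.mod ((8:Int) + o) 12)).getD false))).map (fun c => c.1) := by
  apply row_eq
  intro c hc
  simp only [altChords, List.mem_cons, List.not_mem_nil, or_false] at hc
  rcases hc with rfl|rfl|rfl|rfl|rfl|rfl|rfl|rfl|rfl|rfl|rfl|rfl|rfl|rfl|rfl|rfl|rfl|rfl|rfl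
  all_goals simp only [checkIntervalMatch, List.all_cons, List.all_nil, Bool.and_true, pvT0, pvT1, pvT2, pvT3, pvT4, pvT5, pvT6, pvT7, pvT8, pvT9, pvT10, pvT11, pvT12, pvT13, pvT14, pvT15, pvT16, pvT17, pvT18, pvM8_0, pvM8_2, pvM8_3, pvM8_4, pvM8_5, pvM8_6, pvM8_7, pvM8_8, pvM8_9, pvM8_10, pvM8_11, pvC8_0, pvC8_2, pvC8_3, pvC8_4, pvC8_5, pvC8_6, pvC8_7, pvC8_8, pvC8_9, pvC8_10, pvC8_11, pvHp8, pvHp10, pvHp11, pvHp0, pvHp1, pvHp2, pvHp3, pvHp4, pvHp5, pvHp6, pvHp7]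
theorem pvRow9 (notes : List String) :
    intervalsToChords (notesToIntverals notes (match getRootNoteArray "a" with | some a => createIntervalDictionary a | none => PySem.Dict.empty)) =
    (altChords.filter (fun c => c.2.all (fun o => (PySem.List.pyGet? (altAllNotes.map (fun n => notes.contains n)) (PySem.Int.mod ((9:Int) + o) 12)).getD false))).map (fun c => c.1) := by
  apply row_eq
  intro c hc
  simp only [altChords, List.mem_cons, List.not_mem_nil, or_false] at hc
  rcases hc with rfl|rfl|rfl|rfl|rfl|rfl|rfl|rfl|rfl|rfl|rfl|rfl|rfl|rfl|rfl|rfl|rfl|rfl|rfl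
  all_goals simp only [checkIntervalMatch, List.all_cons, List.all_nil, Bool.and_true, pvT0, pvT1, pvT2, pvT3, pvT4, pvT5, pvT6, pvT7, pvT8, pvT9, pvT10, pvT11, pvT12, pvT13, pvT14, pvT15, pvT16, pvT17, pvT18, pvM9_0, pvM9_2, pvM9_3, pvM9_4, pvM9_5, pvM9_6, pvM9_7, pvM9_8, pvM9_9, pvM9_10, pvM9_11, pvC9_0, pvC9_2, pvC9_3, pvC9_4, pvC9_5, pvC9_6, pvC9_7, pvC9_8, pvC9_9, pvC9_10, pvC9_11, pvHp9, pvHp11, pvHp0, pvHp1, pvHp2, pvHp3, pvHp4, pvHp5, pvHp6, pvHp7, pvHp8]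
theorem pvRow10 (notes : List String) :
    intervalsToChords (notesToIntverals notes (match getRootNoteArray "a#" with | some a => createIntervalDictionary a | none => PySem.Dict.empty)) =
    (altChords.filter (fun c => c.2.all (fun o => (PySem.List.pyGet? (altAllNotes.map (fun n => notes.contains n)) (PySem.Int.mod ((10:Int) + o) 12)).getD false))).map (fun c => c.1) := by
  apply row_eq
  intro c hc
  simp only [altChords, List.mem_cons, List.not_mem_nil, or_false] at hc
  rcases hc with rfl|rfl|rfl|rfl|rfl|rfl|rfl|rfl|rfl|rfl|rfl|rfl|rfl|rfl|rfl|rfl|rfl|rfl|rfl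
  all_goals simp only [checkIntervalMatch, List.all_cons, List.all_nil, Bool.and_true, pvT0, pvT1, pvT2, pvT3, pvT4, pvT5, pvT6, pvT7, pvT8, pvT9, pvT10, pvT11, pvT12, pvT13, pvT14, pvT15, pvT16, pvT17, pvT18, pvM10_0, pvM10_2, pvM10_3, pvM10_4, pvM10_5, pvM10_6, pvM10_7, pvM10_8, pvM10_9, pvM10_10, pvM10_11, pvC10_0, pvC10_2, pvC10_3, pvC10_4, pvC10_5, pvC10_6, pvC10_7, pvC10_8, pvC10_9, pvC10_10, pvC10_11, pvHp10, pvHp0, pvHp1, pvHp2, pvHp3, pvHp4, pvHp5, pvHp6, pvHp7, pvHp8, pvHp9]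
theorem pvRow11 (notes : List String) :
    intervalsToChords (notesToIntverals notes (match getRootNoteArray "b" with | some a => createIntervalDictionary a | none => PySem.Dict.empty)) =
    (altChords.filter (fun c => c.2.all (fun o => (PySem.List.pyGet? (altAllNotes.map (fun n => notes.contains n)) (PySem.Int.mod ((11:Int) + o) 12)).getD false))).map (fun c => c.1) := by
  apply row_eq
  intro c hc
  simp only [altChords, List.mem_cons, List.not_mem_nil, or_false] at hc
  rcases hc with rfl|rfl|rfl|rfl|rfl|rfl|rfl|rfl|rfl|rfl|rfl|rfl|rfl|rfl|rfl|rfl|rfl|rfl|rfl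
  all_goals simp only [checkIntervalMatch, List.all_cons, List.all_nil, Bool.and_true, pvT0, pvT1, pvT2, pvT3, pvT4, pvT5, pvT6, pvT7, pvT8, pvT9, pvT10, pvT11, pvT12, pvT13, pvT14, pvT15, pvT16, pvT17, pvT18, pvM11_0, pvM11_2, pvM11_3, pvM11_4, pvM11_5, pvM11_6, pvM11_7, pvM11_8, pvM11_9, pvM11_10, pvM11_11, pvC11_0, pvC11_2, pvC11_3, pvC11_4, pvC11_5, pvC11_6, pvC11_7, pvC11_8, pvC11_9, pvC11_10, pvC11_11, pvHp11, pvHp1, pvHp2, pvHp3, pvHp4, pvHp5, pvHp6, pvHp7, pvHp8, pvHp9, pvHp10]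

-- ===== VERDICT =====
theorem getAllMatchingChords_spec : Claim_equal_getAllMatchingChords := by
  intro notes _
  show getAllMatchingChords notes = getAllMatchingChords_alt notes
  rw [getAllMatchingChords]
  simp only [getAllMatchingChords_alt]
  rw [PySem.Dict.items_foldl_insert_fresh pyAllNotes (fun a => a)
        (fun rootNote => intervalsToChords (notesToIntverals notes
          (match getRootNoteArray rootNote with
           | some a => createIntervalDictionary a
           | none => PySem.Dict.empty)))
        PySem.Dict.empty
        (by intro a _; exact PySem.Dict.contains_empty a) (by decide),
      PySem.Dict.items_foldl_insert_fresh (PySem.List.pyRange 0 12 1)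
        (fun r => (PySem.List.pyGet? altAllNotes r).getD "")
        (fun r => (altChords.filter (fun c =>
            c.2.all (fun o =>
              (PySem.List.pyGet? (altAllNotes.map (fun n => notes.contains n)) (PySem.Int.mod (r + o) 12)).getD false))).map
          (fun c => c.1))
        PySem.Dict.empty
        (by intro a _; exact PySem.Dict.contains_empty _) (by decide)]
  rw [show PySem.List.pyRange 0 12 1 = [0,1,2,3,4,5,6,7,8,9,10,11] from by decide]
  simp only [pyAllNotes, List.map_cons, List.map_nil, show (PySem.Dict.empty : PySem.Dict String (List String)).items = [] from rfl, List.nil_append, List.cons.injEq, Prod.mk.injEq, and_true]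
  refine ⟨⟨by decide, ?_⟩, ⟨by decide, ?_⟩, ⟨by decide, ?_⟩, ⟨by decide, ?_⟩, ⟨by decide, ?_⟩, ⟨by decide, ?_⟩, ⟨by decide, ?_⟩, ⟨by decide, ?_⟩, ⟨by decide, ?_⟩, ⟨by decide, ?_⟩, ⟨by decide, ?_⟩, ⟨by decide, ?_⟩⟩
  · exact pvRow0 notes
  · exact pvRow1 notes
  · exact pvRow2 notes
  · exact pvRow3 notes
  · exact pvRow4 notes
  · exact pvRow5 notes
  · exact pvRow6 notes
  · exact pvRow7 notes
  · exact pvRow8 notes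
  · exact pvRow9 notes
  · exact pvRow10 notes
  · exact pvRow11 notes
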